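-- pv_equiv track=rewrite | github.com/ray-project/ray | python/ray/data/_internal/data_quality_utils.py | sanitize_quarantine_data
-- ===== SOURCE A (Python) =====
-- from typing import Any, Dict, List, Optional, Union
--
-- def sanitize_quarantine_data(
--     data: Dict[str, Any], gdpr_fields: Optional[List[str]] = None
-- ) -> Dict[str, Any]:
--     """Sanitize quarantine data for compliance (e.g., GDPR)."""
--     if not gdpr_fields:
--         return data
--
--     sanitized = data.copy()
--     for field in gdpr_fields:
--         if field in sanitized:
--             # Replace with placeholder or hash
--             sanitized[field] = f"<REDACTED_{field.upper()}>"
--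
--     return sanitized
-- ===== SOURCE B (Python) =====
-- def sanitize_quarantine_data(data, gdpr_fields=None):
--     """Sanitize quarantine data for compliance (e.g., GDPR)."""
--     if not gdpr_fields:
--         return data
--     redact = set(gdpr_fields)
--     return {
--         k: f"<REDACTED_{k.upper()}>" if k in redact else v
--         for k, v in data.items()
--     }
-- ===== Notes on version B (the rewrite author's own statement) =====
-- stated objective: idiomatic
-- what changed: Instead of copying the dict and looping over gdpr_fields with a membership test against the dict, B builds a set of the fields once and produces the result in a single dict comprehension over data.items(), redacting each key found in the set.
import Mathlib
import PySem

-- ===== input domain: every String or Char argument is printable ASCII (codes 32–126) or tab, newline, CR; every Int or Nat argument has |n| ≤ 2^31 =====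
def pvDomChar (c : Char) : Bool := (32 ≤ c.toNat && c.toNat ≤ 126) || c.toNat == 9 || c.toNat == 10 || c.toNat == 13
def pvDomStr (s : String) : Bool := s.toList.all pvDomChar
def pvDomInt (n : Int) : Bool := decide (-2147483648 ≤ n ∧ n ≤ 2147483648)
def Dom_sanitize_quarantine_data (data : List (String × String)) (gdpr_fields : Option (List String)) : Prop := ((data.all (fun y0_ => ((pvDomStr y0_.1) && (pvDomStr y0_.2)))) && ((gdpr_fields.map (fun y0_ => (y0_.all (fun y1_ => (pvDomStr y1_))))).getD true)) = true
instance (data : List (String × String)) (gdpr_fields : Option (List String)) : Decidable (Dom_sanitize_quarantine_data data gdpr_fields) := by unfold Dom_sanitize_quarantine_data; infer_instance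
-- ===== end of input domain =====

-- B replaces A's copy-then-loop-over-gdpr_fields with a single dict comprehension over
-- data.items() testing each key against a set of the fields (idiomatic; same cost).

-- the redaction placeholder f"<REDACTED_{field.upper()}>"
def pvRedact (f : String) : String := "<REDACTED_" ++ PySem.Str.upper f ++ ">"

-- ===== PORT A =====
-- sanitized[field] = …  : overwrite the (unique) entry with this key, in place
def pvUpd : List (String × String) → String → List (String × String)
  | [], _ => []
  | (k, v) :: t, f => if k == f then (k, pvRedact f) :: t else (k, v) :: pvUpd t f

-- one iteration of A's loop: 'if field in sanitized: sanitized[field] = …'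
def pvRedactStep (s : List (String × String)) (f : String) : List (String × String) :=
  if s.any (fun p => p.1 == f) then pvUpd s f else s

def sanitize_quarantine_data (data : List (String × String)) (gdpr_fields : Option (List String)) : List (String × String) :=
  match gdpr_fields with
  | none => data
  | some fs => if fs = [] then data else fs.foldl pvRedactStep data

-- ===== PORT B =====
def sanitize_quarantine_data_alt (data : List (String × String)) (gdpr_fields : Option (List String)) : List (String × String) :=
  match gdpr_fields with
  | none => data
  | some fs =>
    if fs = [] then data
    else
      let redact := PySem.Set.ofList fs
      data.map (fun p => if p.1 ∈ redact then (p.1, pvRedact p.1) else p)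

-- ===== PRECONDITION & SPEC =====
-- Pre_ excludes association lists with duplicate keys: they cannot arise from a Python dict
-- (A's parameter type), so no input A accepts is excluded.
def Pre_sanitize_quarantine_data (data : List (String × String)) (gdpr_fields : Option (List String)) : Prop :=
  (data.map Prod.fst).Nodup
instance (data : List (String × String)) (gdpr_fields : Option (List String)) : Decidable (Pre_sanitize_quarantine_data data gdpr_fields) := by unfold Pre_sanitize_quarantine_data; infer_instance

def pvWitness_sanitize_quarantine_data : (List (String × String)) × Option (List String) :=
  ([("name", "alice"), ("id", "7")], some ["name"])

def Spec_sanitize_quarantine_data (data : List (String × String)) (gdpr_fields : Option (List String)) (out : List (String × String)) : Prop := out = sanitize_quarantine_data_alt data gdpr_fields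
instance (data : List (String × String)) (gdpr_fields : Option (List String)) (out : List (String × String)) : Decidable (Spec_sanitize_quarantine_data data gdpr_fields out) := by unfold Spec_sanitize_quarantine_data; infer_instance

-- ===== CLAIM (what is proved, stated in full; the proofs are below) =====
def Claim_equal_sanitize_quarantine_data : Prop := ∀ (data : List (String × String)) (gdpr_fields : Option (List String)), Dom_sanitize_quarantine_data data gdpr_fields → Pre_sanitize_quarantine_data data gdpr_fields → Spec_sanitize_quarantine_data data gdpr_fields (sanitize_quarantine_data data gdpr_fields)

-- ===== LEMMAS AND PROOFS =====

-- pvUpd does not change the key sequence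
theorem pvUpd_keys (s : List (String × String)) (f : String) :
    (pvUpd s f).map Prod.fst = s.map Prod.fst := by
  induction s with
  | nil => rfl
  | cons h t ih =>
    obtain ⟨k, v⟩ := h
    simp only [pvUpd]
    split
    · simp
    · simp [ih]

theorem pvRedactStep_keys (s : List (String × String)) (f : String) :
    (pvRedactStep s f).map Prod.fst = s.map Prod.fst := by
  unfold pvRedactStep; split
  · exact pvUpd_keys s f
  · rfl

-- when f is not among the keys, the per-entry redaction of f is the identity
theorem map_redact_id (t : List (String × String)) (f : String)
    (hf : f ∉ t.map Prod.fst) :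
    t.map (fun p => if p.1 = f then (p.1, pvRedact p.1) else p) = t := by
  induction t with
  | nil => rfl
  | cons h t ih =>
    simp only [List.map_cons, List.mem_cons, not_or] at hf ⊢
    rw [if_neg (by exact fun he => hf.1 he.symm), ih hf.2]

-- one step of A's loop, as a map over the entries (needs distinct keys)
theorem pvRedactStep_eq_map (s : List (String × String)) (f : String)
    (hnd : (s.map Prod.fst).Nodup) :
    pvRedactStep s f = s.map (fun p => if p.1 = f then (p.1, pvRedact p.1) else p) := by
  induction s with
  | nil => rfl
  | cons h t ih =>
    obtain ⟨k, v⟩ := h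
    simp only [List.map_cons, List.nodup_cons] at hnd
    by_cases hk : k = f
    · subst hk
      have hany : ((k, v) :: t).any (fun p => p.1 == k) = true := by simp
      simp only [pvRedactStep, hany, pvUpd, beq_self_eq_true, if_true, List.map_cons]
      rw [map_redact_id t k hnd.1]
    · have hstep : pvRedactStep ((k, v) :: t) f = (k, v) :: pvRedactStep t f := by
        have hkf : (k == f) = false := by simp [hk]
        by_cases hany : (t.any fun p => p.1 == f) = true
        · simp [pvRedactStep, pvUpd, hkf, hany]
        · simp [pvRedactStep, hkf, hany]
      rw [hstep, ih hnd.2, List.map_cons, if_neg hk]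

-- A's whole loop, as one map over the entries
theorem foldl_redact_eq_map (fs : List String) (data : List (String × String))
    (hnd : (data.map Prod.fst).Nodup) :
    fs.foldl pvRedactStep data
      = data.map (fun p => if p.1 ∈ fs then (p.1, pvRedact p.1) else p) := by
  induction fs generalizing data with
  | nil => simp
  | cons f rest ih =>
    rw [List.foldl_cons, ih (pvRedactStep data f) (by rw [pvRedactStep_keys]; exact hnd),
      pvRedactStep_eq_map data f hnd, List.map_map]
    refine List.map_congr_left (fun p _ => ?_)
    by_cases hpf : p.1 = f
    · simp [hpf, Function.comp]
    · by_cases hpr : p.1 ∈ rest <;> simp [hpf, hpr, Function.comp]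

-- ===== VERDICT (by name: the statement is the Claim_ definition above) =====
theorem sanitize_quarantine_data_spec : Claim_equal_sanitize_quarantine_data := by
  intro data gf _ hpre
  unfold Spec_sanitize_quarantine_data
  match gf with
  | none => rfl
  | some fs =>
    by_cases hfs : fs = []
    · simp [sanitize_quarantine_data, sanitize_quarantine_data_alt, hfs]
    · simp only [sanitize_quarantine_data, sanitize_quarantine_data_alt, if_neg hfs]
      rw [foldl_redact_eq_map fs data hpre]
      refine (List.map_congr_left (fun p _ => ?_)).symm
      by_cases hp : p.1 ∈ fs <;> simp [PySem.Set.mem_ofList, hp]
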